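-- pv_equiv track=rewrite | github.com/abhishekghimire40/Datastructures-and-algorithm-practice | python/hackerrank_practice/revision.py | mul_of_digits
-- ===== SOURCE A (Python) =====
-- def mul_of_digits(n):
--
--     # using recursion
--     if n % 10 == n:
--         return n
--     mul = n % 10
--     return mul * mul_of_digits(n//10)
--
--     # using for loop
--     mul = 1
--     for i in range(len(str(n))):
--         mul = mul * (n % 10)
--         n = n // 10
--     return mul
-- ===== SOURCE B (Python) =====
-- def mul_of_digits(n):
--     # string-based: multiply the digit value of each character of the decimal representation
--     mul = 1
--     for c in str(n):
--         mul = mul * (ord(c) - 48)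
--     return mul
-- ===== Notes on version B (the rewrite author's own statement) =====
-- stated objective: alternative
-- what changed: Replaces A's arithmetic recursion on n//10 by a single pass over the decimal string str(n), folding a running product of character digit values.
import Mathlib
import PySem

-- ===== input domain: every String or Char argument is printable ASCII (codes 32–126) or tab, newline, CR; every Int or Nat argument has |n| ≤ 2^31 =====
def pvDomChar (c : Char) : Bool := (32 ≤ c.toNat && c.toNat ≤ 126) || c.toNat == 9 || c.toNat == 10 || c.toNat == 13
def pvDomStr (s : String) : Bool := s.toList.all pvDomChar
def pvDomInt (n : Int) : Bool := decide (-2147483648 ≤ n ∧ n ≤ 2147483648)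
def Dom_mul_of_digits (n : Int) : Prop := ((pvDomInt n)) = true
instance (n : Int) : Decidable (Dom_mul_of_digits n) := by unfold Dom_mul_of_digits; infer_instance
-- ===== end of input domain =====

-- B replaces A's arithmetic recursion on n//10 by a single fold over the decimal string str(n).

-- ===== PORT A =====
-- recursion: base case when the last digit equals n, else last digit times recursive call on the rest;
-- fuel n.toNat + 1 makes the recursion total in Lean — exact for every n with 0 ≤ n (Pre_).
def pvMulA : Nat → Int → Int
  | 0, n => n
  | f + 1, n =>
    if PySem.Int.mod n 10 = n then n
    else (PySem.Int.mod n 10) * pvMulA f (PySem.Int.floordiv n 10)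

def mul_of_digits (n : Int) : Int := pvMulA (n.toNat + 1) n

-- ===== PORT B =====
-- mul = 1; for c in str(n): mul = mul * (ord(c) - 48); return mul
def mul_of_digits_alt (n : Int) : Int :=
  (PySem.Int.toChars n).foldl (fun mul c => mul * ((c.toNat : Int) - 48)) 1

-- ===== PRECONDITION & SPEC =====
-- Pre_ excludes n < 0, on which Python A never returns (RecursionError).
def Pre_mul_of_digits (n : Int) : Prop := 0 ≤ n
instance (n : Int) : Decidable (Pre_mul_of_digits n) := by unfold Pre_mul_of_digits; infer_instance
def pvWitness_mul_of_digits : Int := (12)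

def Spec_mul_of_digits (n : Int) (out : Int) : Prop := out = mul_of_digits_alt n
instance (n : Int) (out : Int) : Decidable (Spec_mul_of_digits n out) := by unfold Spec_mul_of_digits; infer_instance

-- ===== CLAIM (what is proved, stated in full; the proofs are below) =====
def Claim_equal_mul_of_digits : Prop := ∀ (n : Int), Dom_mul_of_digits n → Pre_mul_of_digits n → Spec_mul_of_digits n (mul_of_digits n)

-- ===== LEMMAS AND PROOFS =====

-- digit product on Nat, the common reference value of both ports
def pvP (m : Nat) : Int :=
  if m < 10 then (m : Int) else ((m % 10 : Nat) : Int) * pvP (m / 10)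
decreasing_by exact Nat.div_lt_self (by omega) (by omega)

theorem pvMulA_eq (f : Nat) : ∀ n : Int, 0 ≤ n → n.toNat < f → pvMulA f n = pvP n.toNat := by
  induction f with
  | zero => intro n _ hf; exact absurd hf (Nat.not_lt_zero _)
  | succ f ih =>
    intro n h0 hf
    have h10 : PySem.Int.mod n 10 = n % 10 := PySem.Int.mod_eq_emod_of_pos (by norm_num)
    have hd : PySem.Int.floordiv n 10 = n / 10 := PySem.Int.floordiv_eq_ediv_of_pos (by norm_num)
    by_cases hlt : n < 10
    · have hmod : n % 10 = n := Int.emod_eq_of_lt h0 hlt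
      rw [pvMulA, pvP, if_pos (by omega : n.toNat < 10), if_pos (by rw [h10, hmod])]
      omega
    · have hmodlt : n % 10 < 10 := Int.emod_lt_of_pos n (by norm_num)
      have hP : pvP n.toNat = ((n.toNat % 10 : Nat) : Int) * pvP (n.toNat / 10) := by
        rw [pvP, if_neg (by omega : ¬ n.toNat < 10)]
      have h1 : (n / 10).toNat = n.toNat / 10 := by omega
      have h2 : n % 10 = ((n.toNat % 10 : Nat) : Int) := by omega
      rw [pvMulA, if_neg (by omega), hd, h10,
        ih (n / 10) (by omega) (by omega), hP, h1, h2]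

theorem pv_digitChar_toNat (r : Nat) (h : r < 10) : ((Nat.digitChar r).toNat : Int) - 48 = (r : Int) := by
  interval_cases r <;> decide

-- folding the digit-value product over toDigitsCore's output equals mul * pvP n, given enough fuel
theorem pv_fold_toDigitsCore (f : Nat) :
    ∀ (n : Nat) (acc : List Char) (mul : Int), n < 10 ^ (f + 1) →
    (Nat.toDigitsCore 10 (f + 1) n acc).foldl (fun mul c => mul * ((c.toNat : Int) - 48)) mul
      = acc.foldl (fun mul c => mul * ((c.toNat : Int) - 48)) (mul * pvP n) := by
  induction f with
  | zero =>
    intro n acc mul hf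
    have hn : n / 10 = 0 := by omega
    rw [Nat.toDigitsCore]
    simp only [hn, if_true, List.foldl_cons]
    rw [pv_digitChar_toNat _ (by omega : n % 10 < 10), pvP, if_pos (by omega : n < 10),
      Nat.mod_eq_of_lt (by omega)]
  | succ f ih =>
    intro n acc mul hf
    rw [Nat.toDigitsCore]
    by_cases h0 : n / 10 = 0
    · simp only [h0, if_true, List.foldl_cons]
      rw [pv_digitChar_toNat _ (by omega : n % 10 < 10), pvP, if_pos (by omega : n < 10),
        Nat.mod_eq_of_lt (by omega)]
    · simp only [if_neg h0]
      have hpow : (10:Nat) ^ (f + 1 + 1) = 10 ^ (f + 1) * 10 := by ring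
      rw [ih (n / 10) _ _ (by omega), List.foldl_cons,
        pv_digitChar_toNat _ (by omega : n % 10 < 10)]
      have hPn : pvP n = ((n % 10 : Nat) : Int) * pvP (n / 10) := by
        rw [pvP, if_neg (by omega : ¬ n < 10)]
      rw [hPn]; ring_nf

theorem pv_n_lt_pow (n : Nat) : n < 10 ^ (n + 1) := by
  calc n < 10 ^ n := Nat.lt_pow_self (by norm_num)
    _ ≤ 10 ^ (n + 1) := Nat.pow_le_pow_right (by norm_num) (by omega)

-- ===== VERDICT (by name: the statement is the Claim_ definition above) =====
theorem mul_of_digits_spec : Claim_equal_mul_of_digits := by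
  intro n _ hpre
  have hn0 : (0:Int) ≤ n := hpre
  unfold Spec_mul_of_digits mul_of_digits mul_of_digits_alt
  rw [pvMulA_eq _ n hn0 (by omega)]
  unfold PySem.Int.toChars
  rw [if_neg (by omega), Nat.toDigits,
    pv_fold_toDigitsCore _ _ _ _ (pv_n_lt_pow n.toNat), one_mul]
  simp [List.foldl]
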